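-- pv_equiv track=rewrite | github.com/AdamZhouSE/pythonHomework | Code/CodeRecords/2841/60643/299401.py | solution
-- ===== SOURCE A (Python) =====
-- def XOR(lst):
--     res=[]
--     for i in range(0,len(lst)-1,2):
--         tmp=lst[i]^lst[i+1]
--         res.append(tmp)
--     return res
--
-- def OR(lst):
--     res=[]
--     for i in range(0,len(lst)-1,2):
--         tmp=lst[i]|lst[i+1]
--         res.append(tmp)
--     return res
--
-- def solution(lst,n):
--     #共做n轮
--     for cnt in range(n):
--         if cnt%2==0:
--             lst=OR(lst)
--         else:
--             lst=XOR(lst)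
--     res=lst
--     return  res[0]
-- ===== SOURCE B (Python) =====
-- def solution(lst, n):
--     # recursive divide-and-conquer over the tournament tree (depth-first),
--     # instead of A's level-by-level rebuilding of the whole list
--     def combine(lo, h):
--         if h == 0:
--             return lst[lo]
--         left = combine(lo, h - 1)
--         right = combine(lo + (1 << (h - 1)), h - 1)
--         return (left | right) if h % 2 == 1 else (left ^ right)
--     return combine(0, max(n, 0))
-- ===== Notes on version B (the rewrite author's own statement) =====
-- stated objective: alternative
-- what changed: Replaced the level-by-level breadth-first rebuilding of the whole list with a depth-first recursive divide-and-conquer over the binary tournament tree (combine(lo,h)), choosing OR/XOR by node height; only the 2^n-element prefix is ever read.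
import Mathlib
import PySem

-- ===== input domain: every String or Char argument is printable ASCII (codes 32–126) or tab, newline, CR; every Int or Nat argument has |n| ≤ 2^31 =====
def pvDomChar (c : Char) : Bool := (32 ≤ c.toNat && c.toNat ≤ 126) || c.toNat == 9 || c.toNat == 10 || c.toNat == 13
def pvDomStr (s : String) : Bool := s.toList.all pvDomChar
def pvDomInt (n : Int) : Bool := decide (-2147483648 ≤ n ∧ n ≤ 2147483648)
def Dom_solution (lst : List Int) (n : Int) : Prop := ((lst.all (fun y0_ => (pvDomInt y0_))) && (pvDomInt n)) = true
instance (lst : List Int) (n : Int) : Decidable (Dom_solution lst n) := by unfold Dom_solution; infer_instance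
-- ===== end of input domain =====

-- B replaces A's breadth-first level-by-level rebuilding with a depth-first
-- recursion over the tournament tree; equal output proved on Pre_ (len(lst) ≥ 2^max(n,0)).

-- ===== PORT A =====
-- helper OR: pairwise | over range(0, len-1, 2); indices always in range, so pyGetD is exact
def pyOR (lst : List Int) : List Int :=
  (PySem.List.pyRange 0 ((lst.length : Int) - 1) 2).foldl
    (fun res i => res ++ [PySem.Int.bor (PySem.List.pyGetD lst i 0) (PySem.List.pyGetD lst (i + 1) 0)]) []

-- helper XOR: pairwise ^ over range(0, len-1, 2)
def pyXOR (lst : List Int) : List Int :=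
  (PySem.List.pyRange 0 ((lst.length : Int) - 1) 2).foldl
    (fun res i => res ++ [PySem.Int.bxor (PySem.List.pyGetD lst i 0) (PySem.List.pyGetD lst (i + 1) 0)]) []

-- for cnt in range(n): lst = OR(lst) if cnt%2==0 else XOR(lst); return res[0]
def solution (lst : List Int) (n : Int) : Int :=
  (PySem.List.pyGet? ((PySem.List.pyRange 0 n 1).foldl
    (fun l cnt => if PySem.Int.mod cnt 2 == 0 then pyOR l else pyXOR l) lst) 0).getD 0
  -- res[0]; Pre_ guarantees the final list is nonempty

-- ===== PORT B =====
-- combine(lo, h): leaf lst[lo] at h = 0, else OR/XOR of the two subtrees by height parity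
def combineB (lst : List Int) (lo : Nat) : Nat → Int
  | 0 => PySem.List.pyGetD lst (lo : Int) 0   -- lst[lo]; in range under Pre_
  | h + 1 =>
      let left := combineB lst lo h
      let right := combineB lst (lo + 2 ^ h) h
      if (h + 1) % 2 == 1 then PySem.Int.bor left right else PySem.Int.bxor left right

def solution_alt (lst : List Int) (n : Int) : Int :=
  combineB lst 0 (max n 0).toNat

-- ===== PRECONDITION & SPEC =====
-- Pre_ excludes exactly the inputs where A raises IndexError (res becomes empty): len(lst) < 2^max(n,0)
def Pre_solution (lst : List Int) (n : Int) : Prop := 2 ^ (max n 0).toNat ≤ lst.length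
instance (lst : List Int) (n : Int) : Decidable (Pre_solution lst n) := by unfold Pre_solution; infer_instance
def pvWitness_solution : List Int × Int := ([3, 5, 6, 12], 2)

def Spec_solution (lst : List Int) (n : Int) (out : Int) : Prop := out = solution_alt lst n
instance (lst : List Int) (n : Int) (out : Int) : Decidable (Spec_solution lst n out) := by unfold Spec_solution; infer_instance

-- ===== CLAIM (what is proved, stated in full; the proofs are below) =====
def Claim_equal_solution : Prop := ∀ (lst : List Int) (n : Int), Dom_solution lst n → Pre_solution lst n → Spec_solution lst n (solution lst n)

-- ===== LEMMAS AND PROOFS =====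

-- one round, characterised: pairwise-op over the first 2*(len/2) elements
theorem roundMap_eq (op : Int → Int → Int) (lst : List Int) :
    (PySem.List.pyRange 0 ((lst.length : Int) - 1) 2).foldl
      (fun res i => res ++ [op (PySem.List.pyGetD lst i 0) (PySem.List.pyGetD lst (i + 1) 0)]) []
    = (List.range (lst.length / 2)).map
        (fun k => op (lst.getD (2 * k) 0) (lst.getD (2 * k + 1) 0)) := by
  rw [PySem.List.foldl_append_singleton_eq_map
    (fun i => op (PySem.List.pyGetD lst i 0) (PySem.List.pyGetD lst (i + 1) 0)),
    PySem.List.pyRange_of_pos 0 ((lst.length : Int) - 1) (by norm_num), List.map_map]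
  have hc : (if (0:Int) < (lst.length : Int) - 1
      then (((lst.length : Int) - 1 - 0 + 2 - 1) / 2).toNat else 0) = lst.length / 2 := by
    split_ifs <;> omega
  rw [hc, List.nil_append]
  refine List.map_congr_left (fun k hk => ?_)
  show op (PySem.List.pyGetD lst (0 + 2 * (k : Int)) 0)
      (PySem.List.pyGetD lst (0 + 2 * (k : Int) + 1) 0) = _
  have h1 : (0 : Int) + 2 * (k : Int) = ((2 * k : Nat) : Int) := by push_cast; ring
  have h2 : ((2 * k : Nat) : Int) + 1 = ((2 * k + 1 : Nat) : Int) := by push_cast; ring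
  rw [h1, h2]
  simp only [PySem.List.pyGetD_natCast, List.getD_eq_getElem?_getD]

theorem pyOR_eq (lst : List Int) :
    pyOR lst = (List.range (lst.length / 2)).map
      (fun k => PySem.Int.bor (lst.getD (2 * k) 0) (lst.getD (2 * k + 1) 0)) :=
  roundMap_eq PySem.Int.bor lst

theorem pyXOR_eq (lst : List Int) :
    pyXOR lst = (List.range (lst.length / 2)).map
      (fun k => PySem.Int.bxor (lst.getD (2 * k) 0) (lst.getD (2 * k + 1) 0)) :=
  roundMap_eq PySem.Int.bxor lst

-- A's loop as a structural recursion on the round count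
def iterA (lst : List Int) : Nat → List Int
  | 0 => lst
  | k + 1 => if (k : Int) % 2 = 0 then pyOR (iterA lst k) else pyXOR (iterA lst k)

theorem iterA_length (lst : List Int) (k : Nat) :
    (iterA lst k).length = lst.length / 2 ^ k := by
  induction k with
  | zero => show lst.length = lst.length / 2 ^ 0
            simp
  | succ k ih =>
    have h1 : (pyOR (iterA lst k)).length = (iterA lst k).length / 2 := by
      rw [pyOR_eq]; simp
    have h2 : (pyXOR (iterA lst k)).length = (iterA lst k).length / 2 := by
      rw [pyXOR_eq]; simp
    unfold iterA
    split_ifs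
    · rw [h1, ih, Nat.div_div_eq_div_mul, pow_succ]
    · rw [h2, ih, Nat.div_div_eq_div_mul, pow_succ]

theorem foldl_iterA (lst : List Int) (m : Nat) :
    (List.range m).foldl
      (fun l (k : Nat) => if PySem.Int.mod (0 + (k : Int)) 2 == 0 then pyOR l else pyXOR l) lst
    = iterA lst m := by
  induction m with
  | zero => unfold iterA; simp
  | succ m ih =>
    rw [List.range_succ, List.foldl_append, ih]
    simp only [List.foldl_cons, List.foldl_nil]
    have hmod : PySem.Int.mod (0 + (m : Int)) 2 = (m : Int) % 2 := by
      rw [PySem.Int.mod_eq_emod_of_pos (by norm_num)]; ring_nf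
    conv_rhs => rw [iterA]
    rw [hmod]
    by_cases hp : (m : Int) % 2 = 0 <;> simp [hp]

theorem solution_eq_iterA (lst : List Int) (n : Int) :
    solution lst n = (PySem.List.pyGet? (iterA lst n.toNat) 0).getD 0 := by
  unfold solution
  rw [PySem.List.pyRange_one, List.foldl_map,
    show (n - 0).toNat = n.toNat from by omega, foldl_iterA]

theorem key (h : Nat) (lst : List Int) (j : Nat)
    (hlen : (j + 1) * 2 ^ h ≤ lst.length) :
    (iterA lst h).getD j 0 = combineB lst (j * 2 ^ h) h := by
  induction h generalizing j with
  | zero => unfold iterA combineB; simp [PySem.List.pyGetD_natCast]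
  | succ h ih =>
    have hpow : 0 < 2 ^ h := pow_pos (by norm_num) h
    have hlen' : (2 * j + 2) * 2 ^ h ≤ lst.length := by
      calc (2 * j + 2) * 2 ^ h = (j + 1) * 2 ^ (h + 1) := by ring
        _ ≤ lst.length := hlen
    have hj : j < (iterA lst h).length / 2 := by
      rw [iterA_length]
      have : 2 * j + 2 ≤ lst.length / 2 ^ h := (Nat.le_div_iff_mul_le hpow).mpr hlen'
      omega
    have hIH1 : (iterA lst h).getD (2 * j) 0 = combineB lst (2 * j * 2 ^ h) h :=
      ih (2 * j) (by nlinarith)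
    have hIH2 : (iterA lst h).getD (2 * j + 1) 0 = combineB lst ((2 * j + 1) * 2 ^ h) h :=
      ih (2 * j + 1) (by nlinarith)
    have hget : ∀ (op : Int → Int → Int),
        ((List.range ((iterA lst h).length / 2)).map
          (fun k => op ((iterA lst h).getD (2 * k) 0) ((iterA lst h).getD (2 * k + 1) 0))).getD j 0
        = op ((iterA lst h).getD (2 * j) 0) ((iterA lst h).getD (2 * j + 1) 0) := by
      intro op
      rw [List.getD_eq_getElem?_getD]
      simp [hj]
    unfold iterA combineB
    rw [show j * 2 ^ (h + 1) = 2 * j * 2 ^ h from by ring,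
      show 2 * j * 2 ^ h + 2 ^ h = (2 * j + 1) * 2 ^ h from by ring]
    by_cases hn : h % 2 = 0
    · have hp : (h : Int) % 2 = 0 := by omega
      have hp2 : ((h + 1) % 2 == 1) = true := by
        simp only [beq_iff_eq]; omega
      rw [if_pos hp, if_pos hp2, pyOR_eq, hget, hIH1, hIH2]
    · have hp : ¬ ((h : Int) % 2 = 0) := by omega
      have hp2 : ¬ (((h + 1) % 2 == 1) = true) := by
        simp only [beq_iff_eq]; omega
      rw [if_neg hp, if_neg hp2, pyXOR_eq, hget, hIH1, hIH2]

-- ===== VERDICT (by name: the statement is the Claim_ definition above) =====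
theorem solution_spec : Claim_equal_solution := by
  intro lst n _ hpre
  unfold Spec_solution solution_alt
  have hmt : (max n 0).toNat = n.toNat := by omega
  have hpre' : 2 ^ n.toNat ≤ lst.length := by
    unfold Pre_solution at hpre; rwa [hmt] at hpre
  rw [solution_eq_iterA, hmt]
  have hk := key n.toNat lst 0 (by simpa using hpre')
  have hne : (iterA lst n.toNat).length ≠ 0 := by
    rw [iterA_length]
    have h1 : 1 * 2 ^ n.toNat ≤ lst.length := by omega
    have := (Nat.le_div_iff_mul_le (pow_pos (by norm_num) n.toNat)).mpr h1
    omega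
  rw [PySem.List.pyGet?_zero]
  rw [List.getD_eq_getElem?_getD] at hk
  simpa using hk
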